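-- pv_equiv track=rewrite | github.com/mingxoxo/Algorithm | baekjoon/18111.py | check_cost
-- ===== SOURCE A (Python) =====
-- def check_cost(h, arr, cnt, B):
--     cost = 0
--     inventory = B
--     for i in range(cnt):
--         d = arr[i] - h
--         cost = cost + 2 * d if d > 0 else cost - d
--         inventory += d
--     if inventory < 0:
--         return -1
--     return cost
-- ===== SOURCE B (Python) =====
-- def check_cost(h, arr, cnt, B):
--     freq = {}
--     for a in arr[:max(0, cnt)]:
--         freq[a] = freq.get(a, 0) + 1
--     cost = 0
--     bag = B
--     for v, c in freq.items():
--         if v > h: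
--             cost += 2 * (v - h) * c
--             bag += (v - h) * c
--         elif v < h:
--             cost += (h - v) * c
--             bag -= (h - v) * c
--     return -1 if bag < 0 else cost
-- ===== Notes on version B (the rewrite author's own statement) =====
-- stated objective: alternative
-- what changed: Replaces A's single element-wise loop carrying (cost, inventory) with a histogram: B builds a frequency dict of the prefix heights and then aggregates cost and inventory over the DISTINCT heights weighted by their counts.
import Mathlib
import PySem

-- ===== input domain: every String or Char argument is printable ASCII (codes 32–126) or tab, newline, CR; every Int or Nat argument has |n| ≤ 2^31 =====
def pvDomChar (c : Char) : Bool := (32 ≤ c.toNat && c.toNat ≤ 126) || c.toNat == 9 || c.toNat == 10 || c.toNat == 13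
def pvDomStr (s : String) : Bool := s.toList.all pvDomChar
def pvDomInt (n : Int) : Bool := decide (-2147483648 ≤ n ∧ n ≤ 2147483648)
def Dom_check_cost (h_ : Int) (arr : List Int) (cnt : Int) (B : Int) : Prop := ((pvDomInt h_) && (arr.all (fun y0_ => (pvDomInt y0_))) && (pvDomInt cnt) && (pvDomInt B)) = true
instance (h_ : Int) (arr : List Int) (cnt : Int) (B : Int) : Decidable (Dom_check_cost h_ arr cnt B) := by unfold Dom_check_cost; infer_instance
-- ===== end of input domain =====

-- B replaces A's single element-wise loop with a frequency-dict histogram aggregated over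
-- distinct heights weighted by counts (objective: alternative algorithm/data structure).


-- ===== PORT A =====
def check_cost (h_ : Int) (arr : List Int) (cnt : Int) (B : Int) : Int :=
  let st := (PySem.List.pyRange 0 cnt 1).foldl
    (fun (s : Int × Int) i =>
      let d := PySem.List.pyGetD arr i 0 - h_
      (if d > 0 then s.1 + 2 * d else s.1 - d, s.2 + d)) (0, B)
  if st.2 < 0 then -1 else st.1

-- ===== PORT B =====
def check_cost_alt (h_ : Int) (arr : List Int) (cnt : Int) (B : Int) : Int :=
  let pre := PySem.List.slice arr none (some (max 0 cnt))
  let freq := pre.foldl (fun (d : PySem.Dict Int Int) a => d.insert a (d.getD a 0 + 1))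
    PySem.Dict.empty
  let st := freq.items.foldl
    (fun (s : Int × Int) p =>
      if p.1 > h_ then (s.1 + 2 * (p.1 - h_) * p.2, s.2 + (p.1 - h_) * p.2)
      else if p.1 < h_ then (s.1 + (h_ - p.1) * p.2, s.2 - (h_ - p.1) * p.2)
      else s) (0, B)
  if st.2 < 0 then -1 else st.1

-- ===== PRECONDITION & SPEC =====
-- Pre_ excludes only the inputs where A raises IndexError (cnt past the end of arr).
def Pre_check_cost (h_ : Int) (arr : List Int) (cnt : Int) (B : Int) : Prop :=
  cnt ≤ (arr.length : Int)
instance (h_ : Int) (arr : List Int) (cnt : Int) (B : Int) : Decidable (Pre_check_cost h_ arr cnt B) := by unfold Pre_check_cost; infer_instance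
def pvWitness_check_cost : Int × List Int × Int × Int := (2, [3, 1, 2], 3, 5)

def Spec_check_cost (h_ : Int) (arr : List Int) (cnt : Int) (B : Int) (out : Int) : Prop := out = check_cost_alt h_ arr cnt B
instance (h_ : Int) (arr : List Int) (cnt : Int) (B : Int) (out : Int) : Decidable (Spec_check_cost h_ arr cnt B out) := by unfold Spec_check_cost; infer_instance

-- ===== CLAIM (what is proved, stated in full; the proofs are below) =====
def Claim_equal_check_cost : Prop := ∀ (h_ : Int) (arr : List Int) (cnt : Int) (B : Int), Dom_check_cost h_ arr cnt B → Pre_check_cost h_ arr cnt B → Spec_check_cost h_ arr cnt B (check_cost h_ arr cnt B)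
-- ===== LEMMAS AND PROOFS =====

-- removal / addition aggregates of a list (used only by the proofs)
def remOf (h_ : Int) (l : List Int) : Int := ((l.filter (fun a => a > h_)).map (fun a => a - h_)).sum
def addOf (h_ : Int) (l : List Int) : Int := ((l.filter (fun a => a < h_)).map (fun a => h_ - a)).sum

-- A's loop body, element-wise
def stepE (h_ : Int) (s : Int × Int) (a : Int) : Int × Int :=
  let d := a - h_
  (if d > 0 then s.1 + 2 * d else s.1 - d, s.2 + d)

-- per-height cost and inventory weights of B's item loop
def gf (h_ v : Int) : Int := if v > h_ then 2 * (v - h_) else if v < h_ then h_ - v else 0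

lemma foldlE_eq (h_ : Int) (l : List Int) (c b : Int) :
    l.foldl (stepE h_) (c, b) = (c + 2 * remOf h_ l + addOf h_ l, b + remOf h_ l - addOf h_ l) := by
  induction l generalizing c b with
  | nil => simp [remOf, addOf]
  | cons a l ih =>
    simp only [List.foldl_cons, stepE]
    rw [ih]
    by_cases h1 : a > h_
    · simp [remOf, addOf, List.filter_cons, h1, show ¬ a < h_ by omega,
        show a - h_ > 0 by omega, Prod.ext_iff]
      constructor <;> ring
    · by_cases h2 : a < h_
      · simp [remOf, addOf, List.filter_cons, h1, h2,
          show ¬ a - h_ > 0 by omega, Prod.ext_iff]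
        constructor <;> ring
      · have hae : a = h_ := by omega
        simp [remOf, addOf, List.filter_cons, h1, h2,
          show ¬ a - h_ > 0 by omega, hae, Prod.ext_iff]

lemma rangeFold_eq (h_ : Int) (arr : List Int) (n : Nat) (hn : n ≤ arr.length) (s : Int × Int) :
    (PySem.List.pyRange 0 (n : Int) 1).foldl
      (fun (s : Int × Int) i =>
        let d := PySem.List.pyGetD arr i 0 - h_
        (if d > 0 then s.1 + 2 * d else s.1 - d, s.2 + d)) s
    = (arr.take n).foldl (stepE h_) s := by
  induction n generalizing s with
  | zero => simp [PySem.List.pyRange_one_eq_nil]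
  | succ n ih =>
    have hlt : n < arr.length := by omega
    rw [show ((n + 1 : Nat) : Int) = (n : Int) + 1 by push_cast; ring,
        PySem.List.pyRange_one_succ_right (by positivity),
        List.foldl_append, ih (by omega)]
    rw [List.take_add_one, List.getElem?_eq_getElem hlt, List.foldl_append]
    simp [stepE, PySem.List.pyGetD_natCast, List.getD_eq_getElem?_getD,
      List.getElem?_eq_getElem hlt]

-- B's item loop body (defeq to the lambda in check_cost_alt)
def stepI (h_ : Int) (s : Int × Int) (p : Int × Int) : Int × Int :=
  if p.1 > h_ then (s.1 + 2 * (p.1 - h_) * p.2, s.2 + (p.1 - h_) * p.2)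
  else if p.1 < h_ then (s.1 + (h_ - p.1) * p.2, s.2 - (h_ - p.1) * p.2)
  else s

-- B's item loop is additive: it adds gf-weighted cost and (v-h)-weighted inventory
lemma itemsFold_eq (h_ : Int) (ps : List (Int × Int)) (c b : Int) :
    ps.foldl (stepI h_) (c, b)
    = (c + (ps.map (fun p => gf h_ p.1 * p.2)).sum,
       b + (ps.map (fun p => (p.1 - h_) * p.2)).sum) := by
  induction ps generalizing c b with
  | nil => simp
  | cons p t ih =>
    simp only [List.foldl_cons, List.map_cons, List.sum_cons, stepI]
    by_cases h1 : p.1 > h_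
    · rw [if_pos h1, ih]; simp [gf, h1, Prod.ext_iff]; constructor <;> ring
    · by_cases h2 : p.1 < h_
      · rw [if_neg h1, if_pos h2, ih]
        simp [gf, h1, h2, Prod.ext_iff]; constructor <;> ring
      · have he : p.1 = h_ := by omega
        rw [if_neg h1, if_neg h2, ih]
        simp [gf, h1, h2, he]

-- sum of an indicator over a Nodup list picks the single member
lemma sum_indicator (f : Int → Int) (S : List Int) (a : Int) (hnd : S.Nodup) (ha : a ∈ S) :
    (S.map (fun k => if k = a then f k else 0)).sum = f a := by
  induction S with
  | nil => cases ha
  | cons s t ih =>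
    simp only [List.map_cons, List.sum_cons]
    rcases List.mem_cons.mp ha with h | h
    · have hz : ∀ k ∈ t, (if k = a then f k else 0) = 0 := by
        intro k hk
        have hne : k ≠ a := fun he => (List.nodup_cons.mp hnd).1 (h ▸ (he ▸ hk))
        simp [hne]
      rw [if_pos h.symm, List.sum_eq_zero (by simpa using hz), ← h]
      ring
    · have hns : s ≠ a := fun he => (List.nodup_cons.mp hnd).1 (he ▸ h)
      rw [if_neg hns, ih (List.nodup_cons.mp hnd).2 h]
      ring

-- summing f weighted by counts over a covering Nodup list = summing f over the list itself
lemma sum_mul_count (f : Int → Int) (S l : List Int) (hnd : S.Nodup)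
    (hsub : ∀ a ∈ l, a ∈ S) :
    (S.map (fun k => f k * (l.count k : Int))).sum = (l.map f).sum := by
  induction l with
  | nil => simp
  | cons a t ih =>
    have hstep : ∀ k : Int, ((a :: t).count k : Int)
        = (t.count k : Int) + (if k = a then 1 else 0) := by
      intro k
      by_cases hk : k = a
      · subst hk; simp [List.count_cons]
      · simp [List.count_cons, hk, Ne.symm hk]
    have hsplit : (S.map (fun k => f k * ((a :: t).count k : Int))).sum
        = (S.map (fun k => f k * (t.count k : Int))).sum
          + (S.map (fun k => if k = a then f k else 0)).sum := by
      rw [← PySem.List.sum_map_add_int]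
      refine congrArg List.sum (List.map_congr_left ?_)
      intro k _
      rw [hstep k]
      by_cases hk : k = a <;> simp [hk] <;> ring
    rw [hsplit, ih (fun x hx => hsub x (List.mem_cons_of_mem _ hx)),
        sum_indicator f S a hnd (hsub a List.mem_cons_self)]
    rw [List.map_cons, List.sum_cons]
    omega

lemma sum_gf (h_ : Int) (l : List Int) :
    (l.map (gf h_)).sum = 2 * remOf h_ l + addOf h_ l := by
  induction l with
  | nil => simp [remOf, addOf]
  | cons a t ih =>
    by_cases h1 : a > h_
    · simp [gf, remOf, addOf, h1, show ¬ a < h_ by omega] at ih ⊢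
      omega
    · by_cases h2 : a < h_
      · simp [gf, remOf, addOf, h1, h2] at ih ⊢; omega
      · simp [gf, remOf, addOf, h1, h2] at ih ⊢; omega

lemma sum_sub (h_ : Int) (l : List Int) :
    (l.map (fun a => a - h_)).sum = remOf h_ l - addOf h_ l := by
  induction l with
  | nil => simp [remOf, addOf]
  | cons a t ih =>
    by_cases h1 : a > h_
    · simp [remOf, addOf, h1, show ¬ a < h_ by omega] at ih ⊢; omega
    · by_cases h2 : a < h_
      · simp [remOf, addOf, h1, h2] at ih ⊢; omega
      · have he : a = h_ := by omega
        simp [remOf, addOf, h1, h2, he] at ih ⊢; omega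

-- B computes the same (cost, inventory) pair as the element-wise aggregates of the whole list
lemma alt_eq (h_ : Int) (l : List Int) (B : Int) :
    check_cost_alt h_ l (l.length : Int) B
    = if B + remOf h_ l - addOf h_ l < 0 then -1 else 2 * remOf h_ l + addOf h_ l := by
  unfold check_cost_alt
  have hmax : max 0 ((l.length : Int)) = (l.length : Int) := by omega
  rw [hmax, PySem.List.slice_to_natCast]
  simp only [List.take_length]
  rw [PySem.Dict.foldl_insert_getD_add_one_eq_counter, PySem.Dict.items_counter,
    show (fun (s : Int × Int) (p : Int × Int) =>
      if p.1 > h_ then (s.1 + 2 * (p.1 - h_) * p.2, s.2 + (p.1 - h_) * p.2)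
      else if p.1 < h_ then (s.1 + (h_ - p.1) * p.2, s.2 - (h_ - p.1) * p.2)
      else s) = stepI h_ from rfl,
    itemsFold_eq]
  have h1 : ((PySem.Set.ofList l).map (fun k => (k, (l.count k : Int)))).map
      (fun p => gf h_ p.1 * p.2) = (PySem.Set.ofList l).map (fun k => gf h_ k * (l.count k : Int)) := by
    simp [List.map_map, Function.comp]
  have h2 : ((PySem.Set.ofList l).map (fun k => (k, (l.count k : Int)))).map
      (fun p => (p.1 - h_) * p.2) = (PySem.Set.ofList l).map (fun k => (k - h_) * (l.count k : Int)) := by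
    simp [List.map_map, Function.comp]
  rw [h1, h2,
    sum_mul_count (gf h_) _ l (PySem.Set.nodup_ofList l)
      (fun a ha => (PySem.Set.mem_ofList l a).mpr ha),
    sum_mul_count (fun a => a - h_) _ l (PySem.Set.nodup_ofList l)
      (fun a ha => (PySem.Set.mem_ofList l a).mpr ha),
    sum_gf, sum_sub]
  dsimp only
  split_ifs with hb1 hb2 hb2 <;> first | rfl | omega | ring

-- check_cost_alt depends only on the prefix arr[:cnt]
lemma alt_take (h_ : Int) (arr : List Int) (cnt B : Int) (hc : 0 ≤ cnt)
    (hn : cnt ≤ (arr.length : Int)) :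
    check_cost_alt h_ arr cnt B
    = check_cost_alt h_ (arr.take cnt.toNat) (((arr.take cnt.toNat).length : Nat) : Int) B := by
  unfold check_cost_alt
  have hmax1 : max 0 cnt = cnt := by omega
  have hlen : (arr.take cnt.toNat).length = cnt.toNat := by
    rw [List.length_take]; omega
  have hmax2 : max 0 (((arr.take cnt.toNat).length : Nat) : Int)
      = (((arr.take cnt.toNat).length : Nat) : Int) := by omega
  rw [hmax1, hmax2, PySem.List.slice_to_natCast, PySem.List.slice_to arr hc]
  simp [hlen, List.take_take]

theorem check_cost_spec : Claim_equal_check_cost := by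
  intro h_ arr cnt B _ hpre
  unfold Spec_check_cost
  unfold Pre_check_cost at hpre
  by_cases hc : cnt ≤ 0
  · have hz : check_cost h_ arr cnt B = if B < 0 then -1 else 0 := by
      unfold check_cost
      simp [PySem.List.pyRange_one_eq_nil hc]
    have hz' : check_cost_alt h_ arr cnt B = if B < 0 then -1 else 0 := by
      unfold check_cost_alt
      have hmax : max 0 cnt = (0 : Int) := by omega
      rw [hmax, PySem.List.slice_to arr le_rfl]
      simp [PySem.Dict.empty]
    rw [hz, hz']
  · rw [not_le] at hc
    have hcn : cnt = ((cnt.toNat : Nat) : Int) := by omega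
    have htn : cnt.toNat ≤ arr.length := by omega
    have hA : check_cost h_ arr ((cnt.toNat : Nat) : Int) B
        = if B + remOf h_ (arr.take cnt.toNat) - addOf h_ (arr.take cnt.toNat) < 0 then -1
          else 2 * remOf h_ (arr.take cnt.toNat) + addOf h_ (arr.take cnt.toNat) := by
      unfold check_cost
      rw [rangeFold_eq h_ arr cnt.toNat htn, foldlE_eq]
      dsimp only
      split_ifs with hb1 hb2 hb2 <;> first | rfl | omega | ring
    rw [hcn, hA, alt_take h_ arr ((cnt.toNat : Nat) : Int) B (by omega) (by omega)]
    simp only [Int.toNat_natCast]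
    rw [alt_eq]
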